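-- pv_equiv track=rewrite | github.com/xidongc/py_leetcode | array/usernames system.py | usernamesSystem
-- ===== SOURCE A (Python) =====
-- def usernamesSystem(u):
--     #
--     # countDict = collections.Counter(u)
--     # Create a count list
--     countDict = {name:0 for name in u}
--     for i in range(len(u)):
--         name = u[i]
--         if countDict[name] > 0:
--             u[i] = name + str(countDict[name])
--         countDict[name] += 1
--     return u
-- ===== SOURCE B (Python) =====
-- def usernamesSystem(u):
--     # Two passes, no mutation of u: count totals first, then walk u BACKWARDS,
--     # decrementing the count so it equals the number of earlier occurrences,
--     # building the output back-to-front and reversing it at the end.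
--     remaining = {}
--     for name in u:
--         remaining[name] = remaining.get(name, 0) + 1
--     out = []
--     for name in reversed(u):
--         remaining[name] -= 1
--         c = remaining[name]
--         out.append(name if c == 0 else name + str(c))
--     out.reverse()
--     return out
-- ===== Notes on version B (the rewrite author's own statement) =====
-- stated objective: alternative
-- what changed: Replaces A's single forward pass that mutates u in place with an incrementing dict by a pure two-pass scheme: count totals, then traverse u backwards decrementing the count (so it equals the number of earlier occurrences) and build a fresh output list back-to-front, reversing it at the end; B does not mutate u.
import Mathlib
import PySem

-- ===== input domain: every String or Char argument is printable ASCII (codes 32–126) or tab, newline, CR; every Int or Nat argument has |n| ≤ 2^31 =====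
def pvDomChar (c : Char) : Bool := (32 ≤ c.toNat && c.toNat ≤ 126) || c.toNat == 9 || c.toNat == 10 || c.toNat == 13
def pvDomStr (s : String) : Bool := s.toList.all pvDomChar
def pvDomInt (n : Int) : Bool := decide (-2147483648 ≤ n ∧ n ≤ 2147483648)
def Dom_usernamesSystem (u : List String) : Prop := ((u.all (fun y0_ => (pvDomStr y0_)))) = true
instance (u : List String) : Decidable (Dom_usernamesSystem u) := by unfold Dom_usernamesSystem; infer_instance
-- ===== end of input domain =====

-- B counts totals first, then walks u backwards decrementing the count and building a fresh
-- output back-to-front, instead of A's forward pass that mutates u in place with an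
-- incrementing dict; equivalence is about the RETURN value (A mutates u, B does not).

-- ===== PORT A =====
-- one step of A's `for i in range(len(u))` loop; state = (u, countDict)
def usernamesSystemStep (st : List String × PySem.Dict String Int) (i : Nat) :
    List String × PySem.Dict String Int :=
  let name := PySem.List.pyGetD st.1 (i : Int) ""
  let c := st.2.getD name 0
  let lst := if c > 0 then st.1.set i (name ++ PySem.Int.toStr c) else st.1
  (lst, st.2.insert name (c + 1))

def usernamesSystem (u : List String) : List String :=
  let countDict : PySem.Dict String Int :=
    u.foldl (fun d name => d.insert name 0) PySem.Dict.empty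
  ((List.range u.length).foldl usernamesSystemStep (u, countDict)).1

-- ===== PORT B =====
-- one step of B's `for name in reversed(u)` loop; state = (remaining, out)
def usernamesSystemAltStep (st : PySem.Dict String Int × List String) (name : String) :
    PySem.Dict String Int × List String :=
  let d := st.1.insert name (st.1.getD name 0 - 1)
  let c := d.getD name 0
  (d, st.2 ++ [if c = 0 then name else name ++ PySem.Int.toStr c])

def usernamesSystem_alt (u : List String) : List String :=
  let remaining : PySem.Dict String Int :=
    u.foldl (fun d name => d.insert name (d.getD name 0 + 1)) PySem.Dict.empty
  let st := u.reverse.foldl usernamesSystemAltStep (remaining, [])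
  st.2.reverse

-- ===== PRECONDITION & SPEC =====
def Spec_usernamesSystem (u : List String) (out : List String) : Prop := out = usernamesSystem_alt u
instance (u : List String) (out : List String) : Decidable (Spec_usernamesSystem u out) := by unfold Spec_usernamesSystem; infer_instance

-- ===== CLAIM (what is proved, stated in full; the proofs are below) =====
def Claim_equal_usernamesSystem : Prop := ∀ (u : List String), Dom_usernamesSystem u → Spec_usernamesSystem u (usernamesSystem u)

-- ===== LEMMAS AND PROOFS =====

/-- the value position `i` holds in the final answer -/
def pvTag (u : List String) (i : Nat) : String :=
  let name := u.getD i ""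
  let c := (u.take i).count name
  if c = 0 then name else name ++ PySem.Int.toStr (c : Int)

theorem pvD0_aux (l : List String) (d : PySem.Dict String Int) (x : String)
    (h : d.getD x 0 = 0) :
    (l.foldl (fun d name => d.insert name 0) d).getD x 0 = 0 := by
  induction l generalizing d with
  | nil => exact h
  | cons a t ih =>
    simp only [List.foldl_cons]
    exact ih _ (by rw [PySem.Dict.getD_insert]; split <;> simp [h])

theorem pvB_loop (u : List String) (k : Nat) (hk : k ≤ u.length) :
    (∀ x, ((u.reverse.take k).foldl usernamesSystemAltStep
        (u.foldl (fun d name => d.insert name (d.getD name 0 + 1)) PySem.Dict.empty, [])).1.getD x 0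
      = ((u.take (u.length - k)).count x : Int)) ∧
    ((u.reverse.take k).foldl usernamesSystemAltStep
        (u.foldl (fun d name => d.insert name (d.getD name 0 + 1)) PySem.Dict.empty, [])).2
      = ((List.range' (u.length - k) k).map (pvTag u)).reverse := by
  induction k with
  | zero =>
    refine ⟨fun x => ?_, by simp⟩
    simp [PySem.Dict.getD_foldl_insert_add_one]
  | succ k ih =>
    have hk' : k ≤ u.length := Nat.le_of_succ_le hk
    obtain ⟨hD, hO⟩ := ih hk'
    have hkr : k < u.reverse.length := by simpa using hk
    have hm : u.length - k - 1 < u.length := by omega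
    have hmk : u.length - (k + 1) = u.length - k - 1 := by omega
    have hgr : u.reverse[k]'hkr = u[u.length - k - 1]'hm := by
      rw [List.getElem_reverse]
      congr 1
      omega
    have htk : u.reverse.take (k + 1) = u.reverse.take k ++ [u[u.length - k - 1]'hm] := by
      rw [List.take_add_one]
      simp [List.getElem?_eq_getElem hkr, hgr]
    have htake : u.take (u.length - k) = u.take (u.length - k - 1) ++ [u[u.length - k - 1]'hm] := by
      have hnk : u.length - k = (u.length - k - 1) + 1 := by omega
      conv_lhs => rw [hnk]
      rw [List.take_add_one]
      simp [List.getElem?_eq_getElem hm]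
    set name := u[u.length - k - 1]'hm with hnm
    have hcnt : ((u.take (u.length - k)).count name : Int)
        = ((u.take (u.length - k - 1)).count name : Int) + 1 := by
      rw [htake, List.count_append]
      push_cast
      simp
    rw [htk, List.foldl_append, List.foldl_cons, List.foldl_nil]
    have hc : ((usernamesSystemAltStep ((u.reverse.take k).foldl usernamesSystemAltStep
        (u.foldl (fun d name => d.insert name (d.getD name 0 + 1)) PySem.Dict.empty, []) ) name)).1.getD name 0
        = ((u.take (u.length - k - 1)).count name : Int) := by
      simp only [usernamesSystemAltStep, PySem.Dict.getD_insert_self, hD name, hcnt]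
      ring
    constructor
    · intro x
      rcases eq_or_ne x name with h | h
      · rw [h, hmk]
        exact hc
      · simp only [usernamesSystemAltStep, PySem.Dict.getD_insert, if_neg h, hD x, hmk]
        rw [htake, List.count_append]
        have : [name].count x = 0 := by simp [h.symm]
        rw [this]
        push_cast
        ring
    · simp only [usernamesSystemAltStep]
      rw [hO, PySem.Dict.getD_insert_self, hD name, hcnt]
      have hrng : List.range' (u.length - (k + 1)) (k + 1)
          = (u.length - k - 1) :: List.range' (u.length - k) k := by
        have h2 : (u.length - k - 1) + 1 = u.length - k := by omega
        rw [hmk, List.range'_succ, h2]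
      rw [hrng, List.map_cons, List.reverse_cons]
      congr 1
      simp only [pvTag, List.getD_eq_getElem?_getD, List.getElem?_eq_getElem hm, Option.getD_some, ← hnm]
      have : ((u.take (u.length - k - 1)).count name : Int) + 1 - 1
          = ((u.take (u.length - k - 1)).count name : Int) := by ring
      rw [this]
      split
      · next h0 =>
        rw [if_pos (by exact_mod_cast h0)]
      · next h0 =>
        rw [if_neg (by exact_mod_cast h0)]

theorem pvB_eq (u : List String) :
    usernamesSystem_alt u = (List.range u.length).map (pvTag u) := by
  have h := (pvB_loop u u.length le_rfl).2
  simp only [Nat.sub_self, List.take_reverse, List.drop_zero] at h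
  simp only [usernamesSystem_alt]
  rw [h]
  simp [List.range_eq_range']

theorem pvA_loop (u : List String) (j : Nat) (hj : j ≤ u.length) :
    ((List.range j).foldl usernamesSystemStep
        (u, u.foldl (fun d name => d.insert name 0) PySem.Dict.empty)).1
      = (List.range u.length).map (fun i => if i < j then pvTag u i else u.getD i "") ∧
    (∀ x, ((List.range j).foldl usernamesSystemStep
        (u, u.foldl (fun d name => d.insert name 0) PySem.Dict.empty)).2.getD x 0
      = ((u.take j).count x : Int)) := by
  induction j with
  | zero =>
    constructor
    · apply List.ext_getElem
      · simp
      · intro k h1 h2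
        have hk : k < u.length := by simpa using h1
        simp [List.getD_eq_getElem?_getD, List.getElem?_eq_getElem hk]
    · intro x
      simpa using pvD0_aux u _ x (PySem.Dict.getD_empty ..)
  | succ j ih =>
    have hj' : j ≤ u.length := Nat.le_of_succ_le hj
    have hjlt : j < u.length := hj
    obtain ⟨hL, hD⟩ := ih hj'
    rw [List.range_succ, List.foldl_append, List.foldl_cons, List.foldl_nil]
    set st := (List.range j).foldl usernamesSystemStep
        (u, u.foldl (fun d name => d.insert name 0) PySem.Dict.empty) with hst
    have hname : PySem.List.pyGetD st.1 (j : Int) "" = u[j] := by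
      rw [hL, PySem.List.pyGetD_natCast]
      simp [List.getD_eq_getElem?_getD, List.getElem?_eq_getElem hjlt,
        List.getElem?_eq_getElem (by simpa using hjlt : j < (List.range u.length).length),
        List.getElem?_map]
    have hc : st.2.getD (u[j]) 0 = ((u.take j).count (u[j]) : Int) := hD _
    have hgetD : u.getD j "" = u[j] := by
      simp [List.getD_eq_getElem?_getD, List.getElem?_eq_getElem hjlt]
    have htake : u.take (j+1) = u.take j ++ [u[j]] := by
      rw [List.take_add_one]; simp [List.getElem?_eq_getElem hjlt]
    constructor
    · show (usernamesSystemStep st j).1 = _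
      simp only [usernamesSystemStep, hname, hc]
      by_cases h0 : (u.take j).count (u[j]) = 0
      · rw [if_neg (by simp [h0]), hL]
        apply List.map_congr_left
        intro i hi
        rcases lt_trichotomy i j with h | h | h
        · simp [h, Nat.lt_succ_of_lt h]
        · subst h
          simp [pvTag, List.getD_eq_getElem?_getD, List.getElem?_eq_getElem hjlt, h0]
        · have h1 : ¬ i < j := by omega
          have h2 : ¬ i < j + 1 := by omega
          simp [h1, h2]
      · rw [if_pos (by exact_mod_cast Nat.pos_of_ne_zero h0), hL]
        apply List.ext_getElem
        · simp
        · intro k h1 h2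
          have hk : k < u.length := by simpa using h2
          simp only [List.getElem_set, List.getElem_map, List.getElem_range]
          by_cases hkj : j = k
          · subst hkj
            simp [pvTag, List.getD_eq_getElem?_getD, List.getElem?_eq_getElem hjlt, h0]
          · have : (k < j) = (k < j + 1) := by
              apply propext; constructor <;> intro <;> omega
            simp [hkj, this]
    · intro x
      have hstep : (usernamesSystemStep st j).2 = st.2.insert (u[j]) (st.2.getD (u[j]) 0 + 1) := by
        simp [usernamesSystemStep, hname]
      have hcount : List.count x (u.take (j+1)) = List.count x (u.take j) + (if x = u[j] then 1 else 0) := by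
        rw [htake, List.count_append]
        rcases eq_or_ne x u[j] with h | h
        · simp [h]
        · simp [h, h.symm]
      rw [hstep, PySem.Dict.getD_insert, hcount]
      by_cases hx : x = u[j]
      · rw [if_pos hx, if_pos hx, hx, hc]
        push_cast
        ring
      · rw [if_neg hx, if_neg hx, hD x]
        simp

-- ===== VERDICT (by name: the statement is the Claim_ definition above) =====
theorem usernamesSystem_spec : Claim_equal_usernamesSystem := by
  intro u _
  unfold Spec_usernamesSystem usernamesSystem
  rw [pvB_eq]
  have h := (pvA_loop u u.length le_rfl).1
  simp only [h]
  exact List.map_congr_left (fun i hi => by simp [List.mem_range.mp hi])
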